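-- pv_equiv track=rewrite | github.com/bbugi/bbugi_backjoon | 프로그래머스/lv0/120921. 문자열 밀기/문자열 밀기.py | solution
-- ===== SOURCE A (Python) =====
-- from collections import deque
--
-- def solution(A, B):
--     answer = 0
--
--     a = deque(A)
--     b = deque(B)
--
--     if a == b :
--         return 0
--     else:
--         for i in range(len(a)):
--             if a != b :
--                 a.rotate(1)
--                 answer += 1
--         if answer == len(a) :
--             return -1
--
--     return answer
-- ===== SOURCE B (Python) =====
-- def solution(A, B):
--     if A == B:
--         return 0
--     n = len(A)
--     if len(B) != n:
--         return -1
--     p = (A + A).rfind(B, 1, 2 * n - 1)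
--     return -1 if p == -1 else n - p
-- ===== Notes on version B (the rewrite author's own statement) =====
-- stated objective: faster
-- what changed: Replaced the deque rotate-and-compare loop (n rotations, each with an O(n) deque comparison) by a single rightmost-substring search of B in the doubled string A+A, converting the found position into the rotation count.
import Mathlib
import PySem

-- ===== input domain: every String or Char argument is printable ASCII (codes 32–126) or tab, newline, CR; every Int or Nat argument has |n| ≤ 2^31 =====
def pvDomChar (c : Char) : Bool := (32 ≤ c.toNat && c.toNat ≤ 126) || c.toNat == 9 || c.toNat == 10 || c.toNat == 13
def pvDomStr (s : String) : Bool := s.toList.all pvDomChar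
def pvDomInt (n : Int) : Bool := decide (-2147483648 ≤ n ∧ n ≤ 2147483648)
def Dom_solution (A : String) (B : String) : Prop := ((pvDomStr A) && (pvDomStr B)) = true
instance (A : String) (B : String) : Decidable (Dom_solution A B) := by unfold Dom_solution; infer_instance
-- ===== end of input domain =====

-- B replaces A's O(n^2) rotate-and-compare deque loop by one rightmost-substring search in the doubled string A+A (faster).

-- ===== PORT A =====
-- deque.rotate(1): move the last element to the front (no-op on the empty deque)
def pvRotate1 (l : List Char) : List Char :=
  match l.getLast? with
  | none => l
  | some c => c :: l.dropLast

-- loop body: `if a != b : a.rotate(1); answer += 1`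
def pvStep (b : List Char) (s : List Char × Int) : List Char × Int :=
  if s.1 ≠ b then (pvRotate1 s.1, s.2 + 1) else s

def solution (A : String) (B : String) : Int :=
  let a := A.toList
  let b := B.toList
  if a = b then 0
  else
    let s := (List.range a.length).foldl (fun s _ => pvStep b s) (a, 0)
    if s.2 = (s.1.length : Int) then -1 else s.2

-- ===== PORT B =====
-- hand port of `(A+A).rfind(B, 1, 2*n-1)` (no PySem primitive for rfind): scan the
-- candidate start positions p = n-1, …, 1 downward, return the first (= highest) match;
-- exact on this usage since a match at p needs p + len(B) ≤ 2n-1, i.e. p ≤ n-1.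
def pvRfindAux (S : List Char) (b : List Char) : Nat → Option Nat
  | 0 => none
  | p + 1 => if (S.drop (p + 1)).take b.length = b then some (p + 1) else pvRfindAux S b p

def solution_alt (A : String) (B : String) : Int :=
  let a := A.toList
  let b := B.toList
  if a = b then 0
  else
    let n := a.length
    if b.length ≠ n then -1
    else
      match pvRfindAux (a ++ a) b (n - 1) with
      | none => -1
      | some p => (n : Int) - (p : Int)

-- ===== PRECONDITION & SPEC =====
def Spec_solution (A : String) (B : String) (out : Int) : Prop := out = solution_alt A B
instance (A : String) (B : String) (out : Int) : Decidable (Spec_solution A B out) := by unfold Spec_solution; infer_instance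

-- ===== CLAIM (what is proved, stated in full; the proofs are below) =====
def Claim_equal_solution : Prop := ∀ (A : String) (B : String), Dom_solution A B → Spec_solution A B (solution A B)

-- ===== LEMMAS AND PROOFS =====

-- `rotN j a` = the deque after j executions of `a.rotate(1)`
def rotN : Nat → List Char → List Char
  | 0, l => l
  | k + 1, l => pvRotate1 (rotN k l)

theorem pvRotate1_length (l : List Char) : (pvRotate1 l).length = l.length := by
  unfold pvRotate1
  cases h : l.getLast? with
  | none => rfl
  | some c =>
    have hl : l ≠ [] := by rintro rfl; simp at h
    have hpos : 0 < l.length := List.length_pos_of_ne_nil hl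
    simp [List.length_dropLast]
    omega

theorem rotN_length (j : Nat) (l : List Char) : (rotN j l).length = l.length := by
  induction j with
  | zero => rfl
  | succ k ih => simpa [rotN, pvRotate1_length] using ih

-- closed form: j right-rotations of a = a[n-j:] ++ a[:n-j]
theorem rotN_closed (a : List Char) (j : Nat) (hj : j ≤ a.length) :
    rotN j a = a.drop (a.length - j) ++ a.take (a.length - j) := by
  induction j with
  | zero => simp [rotN]
  | succ k ih =>
    have hk : k ≤ a.length := by omega
    obtain ⟨m, hm⟩ : ∃ m, a.length - k = m + 1 := ⟨a.length - k - 1, by omega⟩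
    have hlt : m < a.length := by omega
    have htake : a.take (a.length - k) = a.take m ++ [a[m]] := by
      rw [hm, List.take_add_one, List.getElem?_eq_getElem hlt]
      simp
    have hdrop : a.drop m = a[m] :: a.drop (a.length - k) := by
      rw [hm]
      exact List.drop_eq_getElem_cons hlt
    rw [rotN, ih hk, htake]
    rw [show a.drop (a.length - k) ++ (a.take m ++ [a[m]]) =
        (a.drop (a.length - k) ++ a.take m) ++ [a[m]] from (List.append_assoc _ _ _).symm]
    unfold pvRotate1
    rw [List.getLast?_concat, List.dropLast_concat]
    have hgoal : a.length - (k + 1) = m := by omega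
    rw [hgoal, hdrop]
    simp

-- state of A's loop after i iterations
def pvIter (b : List Char) (s : List Char × Int) : Nat → List Char × Int
  | 0 => s
  | i + 1 => pvStep b (pvIter b s i)

theorem foldl_eq_iter (b : List Char) (s : List Char × Int) (i : Nat) :
    (List.range i).foldl (fun s _ => pvStep b s) s = pvIter b s i := by
  induction i with
  | zero => rfl
  | succ k ih => rw [List.range_succ, List.foldl_append, ih]; rfl

theorem iter_not_found (a b : List Char) (i : Nat)
    (h : ∀ j < i, rotN j a ≠ b) :
    pvIter b (a, 0) i = (rotN i a, (i : Int)) := by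
  induction i with
  | zero => rfl
  | succ k ih =>
    have ih' := ih (fun j hj => h j (by omega))
    rw [pvIter, ih']
    unfold pvStep
    rw [if_pos (h k (by omega))]
    simp [rotN]

theorem iter_found (a b : List Char) (i j : Nat)
    (hj : j ≤ i) (hmin : ∀ k < j, rotN k a ≠ b) (heq : rotN j a = b) :
    pvIter b (a, 0) i = (rotN j a, (j : Int)) := by
  induction i with
  | zero =>
    have : j = 0 := by omega
    subst this; rfl
  | succ k ih =>
    by_cases hk : j ≤ k
    · rw [pvIter, ih hk]
      unfold pvStep
      rw [if_neg (by simp [heq])]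
    · have : j = k + 1 := by omega
      subst this
      rw [pvIter, iter_not_found a b k (fun m hm => hmin m (by omega))]
      unfold pvStep
      rw [if_pos (hmin k (by omega))]
      simp [rotN]

-- the match condition of B's scan, for p ≤ n, is exactly "rotate right n-p times gives b"
theorem cond_iff (a b : List Char) (q : Nat) (hq1 : 1 ≤ q) (hq : q ≤ a.length)
    (hb : b.length = a.length) :
    (((a ++ a).drop q).take b.length = b) ↔ rotN (a.length - q) a = b := by
  have hdrop : (a ++ a).drop q = a.drop q ++ a := List.drop_append_of_le_length hq
  have hlen : (a.drop q).length = a.length - q := by simp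
  have htake : (a.drop q ++ a).take a.length
      = a.drop q ++ a.take (a.length - (a.length - q)) := by
    rw [List.take_append, hlen, List.take_of_length_le (by rw [hlen]; omega)]
  have hqq : a.length - (a.length - q) = q := by omega
  have hclosed : rotN (a.length - q) a
      = a.drop (a.length - (a.length - q)) ++ a.take (a.length - (a.length - q)) :=
    rotN_closed a (a.length - q) (by omega)
  rw [hb, hdrop, htake, hqq, hclosed, hqq]

theorem rfind_none (S b : List Char) (p : Nat)
    (h : pvRfindAux S b p = none) :
    ∀ r, 1 ≤ r → r ≤ p → ¬ ((S.drop r).take b.length = b) := by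
  induction p with
  | zero => intro r h1 h2; omega
  | succ k ih =>
    intro r h1 h2
    unfold pvRfindAux at h
    by_cases hc : (S.drop (k + 1)).take b.length = b
    · rw [if_pos hc] at h; exact absurd h (by simp)
    · rw [if_neg hc] at h
      by_cases hr : r = k + 1
      · subst hr; exact hc
      · exact ih h r h1 (by omega)

theorem rfind_some (S b : List Char) (p q : Nat)
    (h : pvRfindAux S b p = some q) :
    1 ≤ q ∧ q ≤ p ∧ ((S.drop q).take b.length = b) ∧
      ∀ r, q < r → r ≤ p → ¬ ((S.drop r).take b.length = b) := by
  induction p with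
  | zero => exact absurd h (by simp [pvRfindAux])
  | succ k ih =>
    unfold pvRfindAux at h
    by_cases hc : (S.drop (k + 1)).take b.length = b
    · rw [if_pos hc] at h
      have hq : q = k + 1 := by simpa using h.symm
      subst hq
      exact ⟨by omega, le_refl _, hc, fun r h1 h2 _ => by omega⟩
    · rw [if_neg hc] at h
      obtain ⟨h1, h2, h3, h4⟩ := ih h
      refine ⟨h1, by omega, h3, fun r hr1 hr2 hcr => ?_⟩
      by_cases hr : r = k + 1
      · subst hr; exact hc hcr
      · exact h4 r hr1 (by omega) hcr

-- ===== VERDICT (by name: the statement is the Claim_ definition above) =====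
theorem solution_spec : Claim_equal_solution := by
  intro A B _
  unfold Spec_solution solution solution_alt
  set a := A.toList with ha
  set b := B.toList with hbdef
  by_cases hab : a = b
  · simp [hab]
  · rw [if_neg hab, if_neg hab]
    simp only [foldl_eq_iter]
    set n := a.length with hn
    by_cases hlen : b.length = n
    · -- equal lengths
      rw [if_neg (show ¬ b.length ≠ n by omega)]
      by_cases hex : ∃ j, j < n ∧ rotN j a = b
      · -- A finds the minimal rotation j
        have hdec : DecidablePred (fun j => j < n ∧ rotN j a = b) := by
          intro j; infer_instance
        set j := Nat.find hex with hj
        obtain ⟨hjn, hjeq⟩ := Nat.find_spec hex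
        rw [← hj] at hjn hjeq
        have hmin : ∀ k < j, rotN k a ≠ b := by
          intro k hk hkeq
          exact Nat.find_min hex hk ⟨by omega, hkeq⟩
        have hj1 : 1 ≤ j := by
          by_contra h
          have h0 : j = 0 := by omega
          rw [h0] at hjeq
          exact hab (by simpa [rotN] using hjeq)
        rw [iter_found a b n j (by omega) hmin hjeq]
        have hrotlen : (rotN j a).length = n := rotN_length j a
        rw [if_neg (show ¬ ((j : Int) = ((rotN j a).length : Int)) by
          rw [hrotlen]; exact_mod_cast (by omega : ¬ (j : Int) = (n : Int)))]
        -- B finds p = n - j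
        have hcondnj : ((a ++ a).drop (n - j)).take b.length = b := by
          rw [cond_iff a b (n - j) (by omega) (by omega) hlen]
          have : n - (n - j) = j := by omega
          rw [this]; exact hjeq
        cases hfind : pvRfindAux (a ++ a) b (n - 1) with
        | none =>
          exact absurd hcondnj (rfind_none _ _ _ hfind (n - j) (by omega) (by omega))
        | some q =>
          obtain ⟨hq1, hq2, hq3, hq4⟩ := rfind_some _ _ _ _ hfind
          have hcq : rotN (n - q) a = b := by
            rw [← cond_iff a b q hq1 (by omega) hlen]; exact hq3
          have hle1 : j ≤ n - q := by
            by_contra hlt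
            exact hmin (n - q) (by omega) hcq
          have hle2 : q ≥ n - j := by
            by_contra hlt
            exact hq4 (n - j) (by omega) (by omega) hcondnj
          have hqeq : q = n - j := by omega
          subst hqeq
          show ((j : Nat) : Int) = (n : Int) - ((n - j : Nat) : Int)
          omega
      · -- no rotation works: both return -1
        push Not at hex
        rw [iter_not_found a b n (fun k hk hkeq => hex k hk hkeq)]
        have hrotlen : (rotN n a).length = n := rotN_length n a
        rw [if_pos (show ((n : Int) = ((rotN n a).length : Int)) by rw [hrotlen])]
        cases hfind : pvRfindAux (a ++ a) b (n - 1) with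
        | none => rfl
        | some q =>
          obtain ⟨hq1, hq2, hq3, _⟩ := rfind_some _ _ _ _ hfind
          have hn1 : 1 ≤ n := by
            rcases Nat.eq_zero_or_pos n with h0 | h1
            · exfalso
              apply hab
              have : a = [] := List.eq_nil_of_length_eq_zero (by omega)
              have hb0 : b = [] := List.eq_nil_of_length_eq_zero (by omega)
              rw [this, hb0]
            · exact h1
          have hcq : rotN (n - q) a = b := by
            rw [← cond_iff a b q hq1 (by omega) hlen]; exact hq3
          exact absurd hcq (hex (n - q) (by omega))
    · -- different lengths: A never matches, B returns -1 from the length check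
      rw [if_pos (show b.length ≠ n from hlen)]
      have hnomatch : ∀ k < n, rotN k a ≠ b := by
        intro k _ hkeq
        apply hlen
        rw [← hkeq, rotN_length]
      rw [iter_not_found a b n hnomatch]
      rw [if_pos (show ((n : Int) = ((rotN n a).length : Int)) by rw [rotN_length])]
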